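-- pv_equiv track=rewrite | github.com/hyoungsin/SW-Reskilling | 알고리즘기본과정/DFS/엘리스_dfs(바이러스).py | checkVirus
-- ===== SOURCE A (Python) =====
-- from collections import deque
--
-- def checkVirus(n):
--     Q = deque([1])
--     visited = [0 for i in range(10005)]
--     visited[1] = 1
--     while len(Q) > 0 :
--         cur = Q.popleft()
--         if cur == n :
--             return True
--         for i in [cur*2,cur//3]:
--             if i == 0 or i >10000 or visited[i] != 0 :
--                 continue
--             visited[i] = 1
--             Q.append(i)
--     return False
-- ===== SOURCE B (Python) =====
-- def checkVirus(n):
--     # Search BACKWARD from n over the reversed edge relation: a node y (1..10000)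
--     # is produced by y//2 (when y is even) or by any of 3y, 3y+1, 3y+2 (if <= 10000).
--     # n is infected iff 1 is backward-reachable from n.
--     if n < 1 or n > 10000:
--         return False
--     stack = [n]
--     seen = {n}
--     while stack:
--         y = stack.pop()
--         if y == 1:
--             return True
--         preds = [y // 2] if y % 2 == 0 else []
--         preds += [x for x in (3 * y, 3 * y + 1, 3 * y + 2) if x <= 10000]
--         for p in preds:
--             if p not in seen:
--                 seen.add(p)
--                 stack.append(p)
--     return False
-- ===== Notes on version B (the rewrite author's own statement) =====
-- stated objective: alternative
-- what changed: Replaces A's forward BFS from 1 over successors x*2 and x//3 by a backward search from n over the REVERSED edge relation (predecessors y//2 for even y, and 3y, 3y+1, 3y+2 capped at 10000), answering whether 1 is backward-reachable from n after an initial range check.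
import Mathlib
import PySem

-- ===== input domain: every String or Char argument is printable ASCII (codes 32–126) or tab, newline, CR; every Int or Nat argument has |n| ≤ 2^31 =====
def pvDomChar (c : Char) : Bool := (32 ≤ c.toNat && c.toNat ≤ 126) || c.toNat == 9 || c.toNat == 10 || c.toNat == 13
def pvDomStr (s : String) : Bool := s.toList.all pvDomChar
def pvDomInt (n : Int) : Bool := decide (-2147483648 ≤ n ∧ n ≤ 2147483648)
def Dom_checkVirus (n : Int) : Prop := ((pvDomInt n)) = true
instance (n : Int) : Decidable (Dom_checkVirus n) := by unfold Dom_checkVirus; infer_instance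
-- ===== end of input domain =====

-- B replaces A's forward BFS from 1 by a backward search from n over the reversed
-- edge relation (objective: alternative, same bounded cost).

-- ===== PORT A =====
-- one neighbour update of (queue, visited); the `none` branch of pyGet? is Python's
-- IndexError, unreachable in any run of checkVirus (the guard keeps i strictly inside visited)
def checkVirusStep (s : List Int × List Int) (i : Int) : List Int × List Int :=
  if i = 0 ∨ i > 10000 then s
  else
    match PySem.List.pyGet? s.2 i with
    | none => s
    | some v => if v ≠ 0 then s else (s.1 ++ [i], s.2.set i.toNat 1)

-- the while loop; fuel is only a totality guard: 30000 always suffices (see the measure lemmas)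
def checkVirusLoop (fuel : Nat) (n : Int) (Q visited : List Int) : Bool :=
  match fuel, Q with
  | 0, _ => false
  | _ + 1, [] => false
  | fuel + 1, cur :: rest =>
    if cur = n then true
    else
      let s := [cur * 2, PySem.Int.floordiv cur 3].foldl checkVirusStep (rest, visited)
      checkVirusLoop fuel n s.1 s.2

def checkVirus (n : Int) : Bool :=
  let visited := ((PySem.List.pyRange 0 10005 1).map (fun _ => (0 : Int))).set 1 1
  checkVirusLoop 30000 n [1] visited

-- ===== PORT B =====
-- preds = [y // 2] if y % 2 == 0 else []  plus  [x for x in (3y,3y+1,3y+2) if x <= 10000]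
def predsOf (y : Int) : List Int :=
  (if PySem.Int.mod y 2 = 0 then [PySem.Int.floordiv y 2] else []) ++
    ([3 * y, 3 * y + 1, 3 * y + 2].filter (fun x => decide (x ≤ 10000)))

-- the inner for-loop body: if p not in seen: seen.add(p); stack.append(p)
def backStep (s : List Int × List Int) (p : Int) : List Int × List Int :=
  if PySem.Set.contains s.1 p then s
  else (PySem.Set.add s.1 p, s.2 ++ [p])

-- the while loop (y = stack.pop() pops the LAST element); fuel is only a totality
-- guard: 20000 always suffices (see the measure lemmas below)
def backLoop : Nat → List Int → List Int → Bool
  | 0, _, _ => false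
  | fuel + 1, seen, stack =>
    match stack.getLast? with
    | none => false
    | some y =>
      if y = 1 then true
      else
        let s := (predsOf y).foldl backStep (seen, stack.dropLast)
        backLoop fuel s.1 s.2

def checkVirus_alt (n : Int) : Bool :=
  if n < 1 ∨ n > 10000 then false
  else backLoop 20000 (PySem.Set.ofList [n]) [n]

-- ===== PRECONDITION & SPEC =====
def Spec_checkVirus (n : Int) (out : Bool) : Prop := out = checkVirus_alt n
instance (n : Int) (out : Bool) : Decidable (Spec_checkVirus n out) := by unfold Spec_checkVirus; infer_instance

-- ===== CLAIM (what is proved, stated in full; the proofs are below) =====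
def Claim_equal_checkVirus : Prop := ∀ (n : Int), Dom_checkVirus n → Spec_checkVirus n (checkVirus n)

-- ===== LEMMAS AND PROOFS =====

-- the in-range successors of x, and reachability from 1 through them
def nbrs (x : Int) : List Int :=
  [x * 2, PySem.Int.floordiv x 3].filter (fun y => decide (0 < y) && decide (y ≤ 10000))

inductive Reach : Int → Prop
  | one : Reach 1
  | step {x y : Int} : Reach x → y ∈ nbrs x → Reach y

lemma mem_nbrs {x y : Int} :
    y ∈ nbrs x ↔ (y = x * 2 ∨ y = PySem.Int.floordiv x 3) ∧ 0 < y ∧ y ≤ 10000 := by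
  simp [nbrs]

lemma reach_closure {P : Int → Prop} (h1 : P 1)
    (hc : ∀ x, P x → ∀ y ∈ nbrs x, P y) : ∀ x, Reach x → P x := by
  intro x hx
  induction hx with
  | one => exact h1
  | step hx hy ih => exact hc _ ih _ hy

-- x is marked in the visited array
def marked (vis : List Int) (x : Int) : Prop :=
  0 < x ∧ x ≤ 10000 ∧ PySem.List.pyGet? vis x ≠ some 0

lemma checkVirusStep_of_marked {Q vis : List Int} {i : Int} (h : marked vis i) :
    checkVirusStep (Q, vis) i = (Q, vis) := by
  obtain ⟨h1, h2, h3⟩ := h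
  unfold checkVirusStep
  rw [if_neg (by omega : ¬(i = 0 ∨ i > 10000))]
  cases hg : PySem.List.pyGet? vis i with
  | none => rfl
  | some v =>
    have hv : v ≠ 0 := by rintro rfl; exact h3 hg
    simp [hv]

lemma checkVirusStep_out {Q vis : List Int} {i : Int} (h : ¬(0 < i ∧ i ≤ 10000)) (hi : 0 ≤ i) :
    checkVirusStep (Q, vis) i = (Q, vis) := by
  unfold checkVirusStep
  rw [if_pos (by omega : i = 0 ∨ i > 10000)]

lemma checkVirusStep_push {Q vis : List Int} {i : Int}
    (h1 : 0 < i) (h2 : i ≤ 10000) (hm : ¬ marked vis i) :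
    checkVirusStep (Q, vis) i = (Q ++ [i], vis.set i.toNat 1) ∧
      PySem.List.pyGet? vis i = some 0 := by
  have h3 : PySem.List.pyGet? vis i = some 0 := by
    by_contra hc
    exact hm ⟨h1, h2, hc⟩
  refine ⟨?_, h3⟩
  unfold checkVirusStep
  rw [if_neg (by omega : ¬(i = 0 ∨ i > 10000)), h3]
  simp

lemma marked_set {vis : List Int} (hlen : vis.length = 10005) {i : Int}
    (h1 : 0 < i) (h2 : i ≤ 10000) (x : Int) :
    marked (vis.set i.toNat 1) x ↔ (marked vis x ∨ x = i) := by
  have hkey : ∀ z : Int, 0 < z → z ≤ 10000 →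
      PySem.List.pyGet? (vis.set i.toNat 1) z =
        if z = i then some 1 else PySem.List.pyGet? vis z := by
    intro z hz1 hz2
    rw [PySem.List.pyGet?_of_nonneg _ (by omega : (0:Int) ≤ z),
      PySem.List.pyGet?_of_nonneg _ (by omega : (0:Int) ≤ z), List.getElem?_set]
    by_cases hzi : z = i
    · subst hzi
      rw [if_pos rfl, if_pos rfl, if_pos (by omega)]
    · rw [if_neg (by omega : ¬ i.toNat = z.toNat), if_neg hzi]
  unfold marked
  constructor
  · rintro ⟨hx1, hx2, hx3⟩
    by_cases hxi : x = i
    · exact Or.inr hxi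
    · refine Or.inl ⟨hx1, hx2, ?_⟩
      rw [hkey x hx1 hx2, if_neg hxi] at hx3
      exact hx3
  · rintro (⟨hx1, hx2, hx3⟩ | rfl)
    · refine ⟨hx1, hx2, ?_⟩
      rw [hkey x hx1 hx2]
      split
      · simp
      · exact hx3
    · refine ⟨h1, h2, ?_⟩
      rw [hkey x h1 h2, if_pos rfl]
      simp

def measureA (Q vis : List Int) : Nat := 2 * vis.count 0 + Q.length

lemma step_measure {Q vis : List Int} {i : Int} (hi : 0 ≤ i) :
    measureA (checkVirusStep (Q, vis) i).1 (checkVirusStep (Q, vis) i).2 ≤ measureA Q vis := by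
  unfold checkVirusStep
  split
  · exact le_rfl
  · rename_i hguard
    split
    · exact le_rfl
    · rename_i v hg
      split
      · exact le_rfl
      · rename_i hv
        have hv0 : v = 0 := by omega
        subst hv0
        replace hg : PySem.List.pyGet? vis i = some 0 := hg
        rw [PySem.List.pyGet?_of_nonneg _ hi] at hg
        have hlt : i.toNat < vis.length := by
          by_contra hc
          rw [List.getElem?_eq_none (by omega)] at hg
          simp at hg
        have hget : vis[i.toNat] = 0 := by
          rw [List.getElem?_eq_getElem hlt] at hg
          exact Option.some.inj hg
        have hcount := List.count_set (a := (1 : Int)) (b := (0 : Int)) (l := vis)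
          (i := i.toNat) hlt
        have hpos : 0 < vis.count 0 := by
          rw [List.count_pos_iff]
          exact hget ▸ List.getElem_mem hlt
        unfold measureA
        simp only [List.length_append, List.length_singleton]
        rw [hcount, hget]
        simp only [BEq.rfl, if_pos]
        norm_num
        omega

-- invariant of A's loop
structure InvA (n : Int) (Q vis : List Int) : Prop where
  len : vis.length = 10005
  nodup : Q.Nodup
  qmark : ∀ q ∈ Q, marked vis q
  one : marked vis 1
  closed : ∀ x, marked vis x → x ∉ Q → ∀ y ∈ nbrs x, marked vis y
  reach : ∀ q ∈ Q, Reach q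
  nmem : marked vis n → n ∈ Q

-- invariant in the middle of processing cur's two successors
structure Mid (n cur : Int) (done : List Int) (Q vis : List Int) : Prop where
  len : vis.length = 10005
  nodup : Q.Nodup
  curNot : cur ∉ Q
  curM : marked vis cur
  qmark : ∀ q ∈ Q, marked vis q
  one : marked vis 1
  closedOld : ∀ x, marked vis x → x ∉ Q → x ≠ cur → ∀ y ∈ nbrs x, marked vis y
  doneM : ∀ y ∈ done, 0 < y → y ≤ 10000 → marked vis y
  reach : ∀ q ∈ Q, Reach q
  reachCur : Reach cur
  nmem : marked vis n → n ∈ Q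

lemma mid_step {n cur : Int} {done Q vis : List Int} {i : Int}
    (hiv : i = cur * 2 ∨ i = PySem.Int.floordiv cur 3) (H : Mid n cur done Q vis) :
    Mid n cur (done ++ [i]) (checkVirusStep (Q, vis) i).1 (checkVirusStep (Q, vis) i).2 := by
  have hcur : 0 < cur := H.curM.1
  have hi : 0 ≤ i := by
    rcases hiv with rfl | rfl
    · omega
    · rw [PySem.Int.floordiv_eq_ediv_of_pos (by norm_num)]
      exact Int.ediv_nonneg (by omega) (by norm_num)
  by_cases hrange : 0 < i ∧ i ≤ 10000
  · by_cases hm : marked vis i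
    · rw [checkVirusStep_of_marked hm]
      exact { H with
        doneM := by
          intro y hy hy1 hy2
          rcases List.mem_append.mp hy with hy | hy
          · exact H.doneM y hy hy1 hy2
          · rw [List.mem_singleton] at hy
            subst hy
            exact hm }
    · obtain ⟨heq, hget⟩ := checkVirusStep_push hrange.1 hrange.2 hm
      rw [heq]
      have hms := marked_set H.len hrange.1 hrange.2
      have hmono : ∀ z, marked vis z → marked (vis.set i.toNat 1) z :=
        fun z hz => (hms z).mpr (Or.inl hz)
      have hmi : marked (vis.set i.toNat 1) i := (hms i).mpr (Or.inr rfl)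
      have hiQ : i ∉ Q := fun hq => hm (H.qmark i hq)
      have hreachI : Reach i :=
        Reach.step H.reachCur (mem_nbrs.mpr ⟨by tauto, hrange.1, hrange.2⟩)
      refine { len := ?_, nodup := ?_, curNot := ?_, curM := ?_, qmark := ?_, one := ?_,
               closedOld := ?_, doneM := ?_, reach := ?_, reachCur := H.reachCur, nmem := ?_ }
      · simp [H.len]
      · rw [List.nodup_append]
        refine ⟨H.nodup, List.nodup_singleton _, ?_⟩
        intro a ha b hb
        rw [List.mem_singleton] at hb
        subst hb
        intro hab
        subst hab
        exact hiQ ha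
      · intro hc
        rcases List.mem_append.mp hc with hc | hc
        · exact H.curNot hc
        · rw [List.mem_singleton] at hc
          subst hc
          exact hm H.curM
      · exact hmono _ H.curM
      · intro q hq
        rcases List.mem_append.mp hq with hq | hq
        · exact hmono _ (H.qmark q hq)
        · rw [List.mem_singleton] at hq
          subst hq
          exact hmi
      · exact hmono _ H.one
      · intro x hx hnx hxc y hy
        rcases (hms x).mp hx with hx' | rfl
        · refine hmono _ (H.closedOld x hx' ?_ hxc y hy)
          intro hxq
          exact hnx (List.mem_append_left _ hxq)
        · exact absurd (List.mem_append_right _ (List.mem_singleton_self _)) hnx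
      · intro y hy hy1 hy2
        rcases List.mem_append.mp hy with hy | hy
        · exact hmono _ (H.doneM y hy hy1 hy2)
        · rw [List.mem_singleton] at hy
          subst hy
          exact hmi
      · intro q hq
        rcases List.mem_append.mp hq with hq | hq
        · exact H.reach q hq
        · rw [List.mem_singleton] at hq
          subst hq
          exact hreachI
      · intro hn
        rcases (hms n).mp hn with hn' | rfl
        · exact List.mem_append_left _ (H.nmem hn')
        · exact List.mem_append_right _ (List.mem_singleton_self _)
  · rw [checkVirusStep_out hrange hi]
    exact { H with
      doneM := by
        intro y hy hy1 hy2
        rcases List.mem_append.mp hy with hy | hy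
        · exact H.doneM y hy hy1 hy2
        · rw [List.mem_singleton] at hy
          subst hy
          exact absurd ⟨hy1, hy2⟩ hrange }

lemma mid_start {n cur : Int} {rest vis : List Int} (hne : cur ≠ n)
    (H : InvA n (cur :: rest) vis) : Mid n cur [] rest vis := by
  obtain ⟨hcn, hrest⟩ := List.nodup_cons.mp H.nodup
  refine { len := H.len, nodup := hrest, curNot := hcn,
           curM := H.qmark cur List.mem_cons_self,
           qmark := fun q hq => H.qmark q (List.mem_cons_of_mem _ hq),
           one := H.one, closedOld := ?_, doneM := by simp,
           reach := fun q hq => H.reach q (List.mem_cons_of_mem _ hq),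
           reachCur := H.reach cur List.mem_cons_self, nmem := ?_ }
  · intro x hx hnx hxc y hy
    refine H.closed x hx ?_ y hy
    intro hmem
    rcases List.mem_cons.mp hmem with h | h
    · exact hxc h
    · exact hnx h
  · intro hn
    rcases List.mem_cons.mp (H.nmem hn) with h | h
    · exact absurd h.symm hne
    · exact h

lemma mid_finish {n cur : Int} {Q vis : List Int}
    (H : Mid n cur [cur * 2, PySem.Int.floordiv cur 3] Q vis) : InvA n Q vis := by
  refine { len := H.len, nodup := H.nodup, qmark := H.qmark, one := H.one,
           closed := ?_, reach := H.reach, nmem := H.nmem }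
  intro x hx hnx y hy
  by_cases hxc : x = cur
  · subst hxc
    rw [mem_nbrs] at hy
    obtain ⟨hyv, hy1, hy2⟩ := hy
    refine H.doneM y ?_ hy1 hy2
    rcases hyv with rfl | rfl
    · exact List.mem_cons_self
    · simp
  · exact H.closedOld x hx hnx hxc y hy

lemma loopA_iff {n : Int} : ∀ (fuel : Nat) (Q vis : List Int), InvA n Q vis →
    measureA Q vis < fuel → (checkVirusLoop fuel n Q vis = true ↔ Reach n) := by
  intro fuel
  induction fuel with
  | zero => intro Q vis _ hm; exact absurd hm (by omega)
  | succ fuel ih =>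
    intro Q vis H hm
    cases Q with
    | nil =>
      simp only [checkVirusLoop, Bool.false_eq_true, false_iff]
      intro h
      have hmn : marked vis n :=
        reach_closure H.one (fun x hx y hy => H.closed x hx (by simp) y hy) n h
      exact absurd (H.nmem hmn) (by simp)
    | cons cur rest =>
      simp only [checkVirusLoop]
      by_cases hcn : cur = n
      · rw [if_pos hcn]
        simp only [true_iff]
        subst hcn
        exact H.reach cur List.mem_cons_self
      · rw [if_neg hcn]
        simp only [List.foldl_cons, List.foldl_nil]
        have hcur : 0 < cur := (H.qmark cur List.mem_cons_self).1
        have hM0 := mid_start hcn H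
        have hM1 := mid_step (Or.inl rfl) hM0
        have hM2 := mid_step (Or.inr rfl) hM1
        have hI : InvA n (checkVirusStep (checkVirusStep (rest, vis) (cur * 2))
            (PySem.Int.floordiv cur 3)).1 (checkVirusStep (checkVirusStep (rest, vis) (cur * 2))
            (PySem.Int.floordiv cur 3)).2 := by
          apply mid_finish
          simpa using hM2
        have hd3 : 0 ≤ PySem.Int.floordiv cur 3 := by
          rw [PySem.Int.floordiv_eq_ediv_of_pos (by norm_num)]
          exact Int.ediv_nonneg (by omega) (by norm_num)
        have hm1 := step_measure (Q := rest) (vis := vis) (i := cur * 2) (by omega)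
        have hm2 := step_measure (Q := (checkVirusStep (rest, vis) (cur * 2)).1)
          (vis := (checkVirusStep (rest, vis) (cur * 2)).2) (i := PySem.Int.floordiv cur 3) hd3
        have hmlt : measureA (checkVirusStep (checkVirusStep (rest, vis) (cur * 2))
            (PySem.Int.floordiv cur 3)).1 (checkVirusStep (checkVirusStep (rest, vis) (cur * 2))
            (PySem.Int.floordiv cur 3)).2 < fuel := by
          have hrest : measureA rest vis + 1 = measureA (cur :: rest) vis := by
            unfold measureA
            simp only [List.length_cons]
            omega
          have h2' : measureA (checkVirusStep (checkVirusStep (rest, vis) (cur * 2))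
              (PySem.Int.floordiv cur 3)).1 (checkVirusStep (checkVirusStep (rest, vis) (cur * 2))
              (PySem.Int.floordiv cur 3)).2 ≤ measureA rest vis := le_trans hm2 hm1
          omega
        exact ih _ _ hI hmlt

lemma checkVirus_iff (n : Int) : checkVirus n = true ↔ Reach n := by
  unfold checkVirus
  have hvis : ((PySem.List.pyRange 0 10005 1).map (fun _ => (0 : Int))).set 1 1 =
      (List.replicate 10005 (0 : Int)).set 1 1 := by
    rw [show (10005 : Int) = ((10005 : Nat) : Int) from by norm_num,
      PySem.List.pyRange_zero_natCast, List.map_map]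
    show ((List.range 10005).map (fun _ => (0 : Int))).set 1 1 = _
    rw [List.map_const', List.length_range]
  simp only [hvis]
  set vis0 := (List.replicate 10005 (0 : Int)).set 1 1 with hv0
  have hlen : vis0.length = 10005 := by
    rw [hv0, List.length_set, List.length_replicate]
  have hget : ∀ z : Int, 0 < z → z ≤ 10000 →
      PySem.List.pyGet? vis0 z = if z = 1 then some 1 else some 0 := by
    intro z hz1 hz2
    rw [PySem.List.pyGet?_of_nonneg _ (by omega : (0:Int) ≤ z), hv0, List.getElem?_set]
    by_cases hz : z = 1
    · subst hz
      norm_num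
    · rw [if_neg (by omega : ¬ (1:Nat) = z.toNat), if_neg hz,
        List.getElem?_replicate, if_pos (by omega)]
  have hm1 : marked vis0 1 := by
    refine ⟨by norm_num, by norm_num, ?_⟩
    rw [hget 1 (by norm_num) (by norm_num), if_pos rfl]
    simp
  have honly : ∀ x, marked vis0 x → x = 1 := by
    rintro x ⟨hx1, hx2, hx3⟩
    by_contra hx
    exact hx3 (by rw [hget x hx1 hx2, if_neg hx])
  have hInv : InvA n [1] vis0 := by
    refine { len := hlen, nodup := List.nodup_singleton _,
             qmark := ?_, one := hm1, closed := ?_, reach := ?_, nmem := ?_ }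
    · intro q hq
      rw [List.mem_singleton] at hq
      subst hq
      exact hm1
    · intro x hx hnx
      exact absurd (by rw [honly x hx]; exact (List.mem_singleton_self _)) hnx
    · intro q hq
      rw [List.mem_singleton] at hq
      subst hq
      exact Reach.one
    · intro hn
      rw [honly n hn]
      exact (List.mem_singleton_self _)
  have hcount : vis0.count 0 = 10004 := by
    rw [hv0, List.count_set (by rw [List.length_replicate]; norm_num)]
    rw [List.count_replicate, List.getElem_replicate]
    norm_num
  have hmu : measureA [1] vis0 < 30000 := by
    unfold measureA
    rw [hcount]
    norm_num
  exact loopA_iff 30000 [1] vis0 hInv hmu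

-- ===== B side =====

lemma lenB {R : List Int} (hd : R.Nodup) (hb : ∀ x ∈ R, 0 < x ∧ x ≤ 10000) :
    R.length ≤ 10000 := by
  have hcard : R.toFinset.card = R.length := List.toFinset_card_of_nodup hd
  have hsub : R.toFinset ⊆ Finset.Icc (1 : Int) 10000 := by
    intro x hx
    rw [List.mem_toFinset] at hx
    have := hb x hx
    rw [Finset.mem_Icc]
    omega
  have hle := Finset.card_le_card hsub
  rw [hcard] at hle
  simpa [Int.card_Icc] using hle

lemma reach_range {n : Int} (h : Reach n) : 0 < n ∧ n ≤ 10000 :=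
  reach_closure (P := fun x => 0 < x ∧ x ≤ 10000) ⟨one_pos, by norm_num⟩
    (fun _ _ y hy => (mem_nbrs.mp hy).2) n h

-- paths through nbrs, read from the front
inductive ReachVia : Int → Int → Prop
  | refl (x : Int) : ReachVia x x
  | head {x y z : Int} : y ∈ nbrs x → ReachVia y z → ReachVia x z

lemma reachVia_snoc {x y z : Int} (h : ReachVia x y) (hz : z ∈ nbrs y) : ReachVia x z := by
  induction h with
  | refl => exact ReachVia.head hz (ReachVia.refl _)
  | head hn _ ih => exact ReachVia.head hn (ih hz)

lemma reachVia_reach {x z : Int} (h : ReachVia x z) (hx : Reach x) : Reach z := by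
  induction h with
  | refl => exact hx
  | head hn _ ih => exact ih (Reach.step hx hn)

lemma reach_iff_reachVia (n : Int) : Reach n ↔ ReachVia 1 n := by
  constructor
  · intro h
    induction h with
    | one => exact ReachVia.refl 1
    | step _ hy ih => exact reachVia_snoc ih hy
  · intro h
    exact reachVia_reach h Reach.one

-- the predecessor list is exactly the reversed nbrs relation (within range)
lemma mem_predsOf {y p : Int} (hy1 : 0 < y) (hy2 : y ≤ 10000) :
    p ∈ predsOf y ↔ 0 < p ∧ p ≤ 10000 ∧ y ∈ nbrs p := by
  unfold predsOf
  rw [List.mem_append, List.mem_filter]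
  constructor
  · rintro (hp | ⟨hp, hple⟩)
    · split at hp
      · rename_i hmod
        rw [List.mem_singleton] at hp
        obtain ⟨c, rfl⟩ : (2 : Int) ∣ y := (PySem.Int.mod_eq_zero_iff_dvd y 2).mp hmod
        have hc : PySem.Int.floordiv (2 * c) 2 = c := by
          rw [PySem.Int.floordiv_eq_ediv_of_pos (by norm_num)]
          exact Int.mul_ediv_cancel_left c (by norm_num)
        subst hp
        rw [hc]
        exact ⟨by omega, by omega, mem_nbrs.mpr ⟨Or.inl (by ring), hy1, hy2⟩⟩
      · simp at hp
    · simp only [List.mem_cons, List.mem_singleton, List.not_mem_nil, or_false] at hp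
      have hple' : p ≤ 10000 := by simpa using hple
      have hfd : PySem.Int.floordiv p 3 = y :=
        (PySem.Int.floordiv_eq_iff_of_pos (by norm_num)).mpr ⟨by omega, by omega⟩
      exact ⟨by omega, hple', mem_nbrs.mpr ⟨Or.inr hfd.symm, hy1, hy2⟩⟩
  · rintro ⟨hp1, hp2, hnb⟩
    obtain ⟨hyv, _, _⟩ := mem_nbrs.mp hnb
    rcases hyv with rfl | hyv
    · left
      have hmod : PySem.Int.mod (p * 2) 2 = 0 :=
        (PySem.Int.mod_eq_zero_iff_dvd _ 2).mpr ⟨p, by ring⟩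
      rw [if_pos hmod, List.mem_singleton,
        PySem.Int.floordiv_eq_ediv_of_pos (by norm_num)]
      exact (Int.mul_ediv_cancel p (by norm_num)).symm
    · right
      obtain ⟨hlo, hhi⟩ := (PySem.Int.floordiv_eq_iff_of_pos (by norm_num)).mp hyv.symm
      refine ⟨?_, by simpa using hp2⟩
      simp only [List.mem_cons, List.mem_singleton, List.not_mem_nil, or_false]
      omega

-- everything the fold over backStep guarantees about (seen', stack')
lemma foldl_backStep (ps : List Int) : ∀ (sn st : List Int), sn.Nodup →
    (ps.foldl backStep (sn, st)).1.Nodup ∧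
    (∀ z, z ∈ (ps.foldl backStep (sn, st)).1 ↔ z ∈ sn ∨ z ∈ ps) ∧
    (∀ z ∈ (ps.foldl backStep (sn, st)).2, z ∈ st ∨ z ∈ (ps.foldl backStep (sn, st)).1) ∧
    (∀ z ∈ st, z ∈ (ps.foldl backStep (sn, st)).2) ∧
    (∀ z ∈ (ps.foldl backStep (sn, st)).1, z ∈ sn ∨ z ∈ (ps.foldl backStep (sn, st)).2) ∧
    ((ps.foldl backStep (sn, st)).1.length + st.length
        = (ps.foldl backStep (sn, st)).2.length + sn.length) ∧
    sn.length ≤ (ps.foldl backStep (sn, st)).1.length := by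
  induction ps with
  | nil =>
    intro sn st hd
    simp only [List.foldl_nil]
    exact ⟨hd, fun z => by simp, fun z hz => Or.inl hz, fun z hz => hz,
      fun z hz => Or.inl hz, by omega, le_rfl⟩
  | cons p ps ih =>
    intro sn st hd
    rw [List.foldl_cons]
    show _ ∧ _
    by_cases hc : PySem.Set.contains sn p = true
    · have hstep : backStep (sn, st) p = (sn, st) := by
        unfold backStep
        dsimp only
        rw [if_pos hc]
      rw [hstep]
      obtain ⟨h1, h2, h3, h4, h5, h6, h7⟩ := ih sn st hd
      have hpmem : p ∈ sn := by simpa [PySem.Set.contains] using hc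
      refine ⟨h1, ?_, h3, h4, h5, h6, h7⟩
      intro z
      rw [h2]
      constructor
      · rintro (h | h)
        · exact Or.inl h
        · exact Or.inr (List.mem_cons_of_mem _ h)
      · rintro (h | h)
        · exact Or.inl h
        · rcases List.mem_cons.mp h with rfl | h
          · exact Or.inl hpmem
          · exact Or.inr h
    · have hstep : backStep (sn, st) p = (PySem.Set.add sn p, st ++ [p]) := by
        unfold backStep
        dsimp only
        rw [if_neg hc]
      rw [hstep]
      have hnd' : (PySem.Set.add sn p).Nodup := PySem.Set.nodup_add sn p hd
      obtain ⟨h1, h2, h3, h4, h5, h6, h7⟩ := ih (PySem.Set.add sn p) (st ++ [p]) hnd'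
      have hadd_len : (PySem.Set.add sn p).length = sn.length + 1 := by
        unfold PySem.Set.add
        rw [if_neg hc]
        simp
      have hadd_mem : ∀ z : Int, z ∈ PySem.Set.add sn p ↔ z ∈ sn ∨ z = p :=
        fun z => PySem.Set.mem_add sn p z
      refine ⟨h1, ?_, ?_, ?_, ?_, ?_, ?_⟩
      · intro z
        rw [h2, hadd_mem]
        constructor
        · rintro ((h | rfl) | h)
          · exact Or.inl h
          · exact Or.inr List.mem_cons_self
          · exact Or.inr (List.mem_cons_of_mem _ h)
        · rintro (h | h)
          · exact Or.inl (Or.inl h)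
          · rcases List.mem_cons.mp h with rfl | h
            · exact Or.inl (Or.inr rfl)
            · exact Or.inr h
      · intro z hz
        rcases h3 z hz with h | h
        · rcases List.mem_append.mp h with h | h
          · exact Or.inl h
          · rw [List.mem_singleton] at h
            subst h
            right
            rw [h2, hadd_mem]
            exact Or.inl (Or.inr rfl)
        · exact Or.inr h
      · intro z hz
        exact h4 z (List.mem_append_left _ hz)
      · intro z hz
        rcases h5 z hz with h | h
        · rw [hadd_mem] at h
          rcases h with h | rfl
          · exact Or.inl h
          · exact Or.inr (h4 _ (List.mem_append_right _ (List.mem_singleton_self _)))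
        · exact Or.inr h
      · rw [hadd_len] at h6
        rw [List.length_append, List.length_singleton] at h6
        omega
      · rw [hadd_len] at h7
        omega

-- invariant of B's loop
structure InvB (n : Int) (seen stack : List Int) : Prop where
  nodup : seen.Nodup
  bounds : ∀ x ∈ seen, 0 < x ∧ x ≤ 10000
  sub : ∀ x ∈ stack, x ∈ seen
  via : ∀ x ∈ seen, ReachVia x n
  nmem : n ∈ seen
  oneStack : (1 : Int) ∈ seen → (1 : Int) ∈ stack
  closed : ∀ x ∈ seen, x ∉ stack → ∀ p ∈ predsOf x, p ∈ seen

def measureB (seen stack : List Int) : Nat := 2 * (10000 - seen.length) + stack.length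

-- if seen is closed under predsOf, it contains everything that forward-reaches n
lemma back_closed {n : Int} {seen : List Int}
    (hcl : ∀ y ∈ seen, ∀ p ∈ predsOf y, p ∈ seen)
    (hn : n ∈ seen) :
    ∀ x, 0 < x → x ≤ 10000 → ReachVia x n → x ∈ seen := by
  have key : ∀ x m, ReachVia x m → m = n → 0 < x → x ≤ 10000 → x ∈ seen := by
    intro x m h
    induction h with
    | refl =>
      rintro rfl _ _
      exact hn
    | head hnb _ ih =>
      intro hm hx1 hx2
      rename_i x' y' z'
      obtain ⟨_, hy1, hy2⟩ := mem_nbrs.mp hnb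
      have hys := ih hm hy1 hy2
      exact hcl _ hys _ ((mem_predsOf hy1 hy2).mpr ⟨hx1, hx2, hnb⟩)
  intro x hx1 hx2 h
  exact key x n h rfl hx1 hx2

lemma backLoop_iff {n : Int} : ∀ (fuel : Nat) (seen stack : List Int), InvB n seen stack →
    measureB seen stack < fuel → (backLoop fuel seen stack = true ↔ Reach n) := by
  intro fuel
  induction fuel with
  | zero => intro seen stack _ hm; exact absurd hm (by omega)
  | succ fuel ih =>
    intro seen stack H hm
    cases hg : stack.getLast? with
    | none =>
      have hstack : stack = [] := List.getLast?_eq_none_iff.mp hg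
      subst hstack
      simp only [backLoop, List.getLast?_nil, Bool.false_eq_true, false_iff]
      intro h
      have h1 : (1 : Int) ∈ seen :=
        back_closed (fun y hy => H.closed y hy (by simp)) H.nmem 1
          one_pos (by norm_num) ((reach_iff_reachVia n).mp h)
      exact absurd (H.oneStack h1) (by simp)
    | some y =>
      have hne : stack ≠ [] := by
        rintro rfl
        simp at hg
      have hy : y = stack.getLast hne := by
        rw [List.getLast?_eq_some_getLast hne] at hg
        exact (Option.some.inj hg).symm
      have hsplit : stack.dropLast ++ [y] = stack := by
        rw [hy]
        exact List.dropLast_append_getLast hne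
      have hymem : y ∈ seen := H.sub y (by rw [hy]; exact List.getLast_mem hne)
      obtain ⟨hy1, hy2⟩ := H.bounds y hymem
      simp only [backLoop, hg]
      by_cases hy1' : y = 1
      · rw [if_pos hy1']
        simp only [true_iff]
        subst hy1'
        exact (reach_iff_reachVia n).mpr (H.via 1 hymem)
      · rw [if_neg hy1']
        obtain ⟨h1, h2, h3, h4, h5, h6, h7⟩ :=
          foldl_backStep (predsOf y) seen stack.dropLast H.nodup
        set r := (predsOf y).foldl backStep (seen, stack.dropLast) with hr
        have hbounds' : ∀ x ∈ r.1, 0 < x ∧ x ≤ 10000 := by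
          intro x hx
          rcases (h2 x).mp hx with h | h
          · exact H.bounds x h
          · have := (mem_predsOf hy1 hy2).mp h
            exact ⟨this.1, this.2.1⟩
        have hdropmem : ∀ z : Int, z ∈ stack.dropLast → z ∈ stack :=
          fun z hz => (List.dropLast_sublist stack).subset hz
        have hInv' : InvB n r.1 r.2 := by
          refine ⟨h1, hbounds', ?_, ?_, ?_, ?_, ?_⟩
          · intro x hx
            rcases h3 x hx with h | h
            · exact (h2 x).mpr (Or.inl (H.sub x (hdropmem x h)))
            · exact h
          · intro x hx
            rcases (h2 x).mp hx with h | h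
            · exact H.via x h
            · obtain ⟨_, _, hnb⟩ := (mem_predsOf hy1 hy2).mp h
              exact ReachVia.head hnb (H.via y hymem)
          · exact (h2 n).mpr (Or.inl H.nmem)
          · intro hone
            rcases h5 1 hone with h | h
            · have h1s : (1 : Int) ∈ stack := H.oneStack h
              rw [← hsplit] at h1s
              rcases List.mem_append.mp h1s with h1s | h1s
              · exact h4 1 h1s
              · rw [List.mem_singleton] at h1s
                exact absurd h1s.symm hy1'
            · exact h
          · intro x hx hnx p hp
            by_cases hxy : x = y
            · subst hxy
              exact (h2 p).mpr (Or.inr hp)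
            · have hxseen : x ∈ seen := by
                rcases h5 x hx with h | h
                · exact h
                · exact absurd h hnx
              have hxnot : x ∉ stack := by
                intro hxs
                rw [← hsplit] at hxs
                rcases List.mem_append.mp hxs with hxs | hxs
                · exact hnx (h4 x hxs)
                · rw [List.mem_singleton] at hxs
                  exact hxy hxs
              exact (h2 p).mpr (Or.inl (H.closed x hxseen hxnot p hp))
        have hlen' : r.1.length ≤ 10000 := lenB h1 hbounds'
        have hdlen : stack.dropLast.length + 1 = stack.length := by
          rw [List.length_dropLast]
          have : 0 < stack.length := List.length_pos_iff.mpr hne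
          omega
        have hmlt : measureB r.1 r.2 < fuel := by
          have hslen : seen.length ≤ 10000 := lenB H.nodup H.bounds
          unfold measureB at hm ⊢
          omega
        exact ih r.1 r.2 hInv' hmlt

lemma checkVirus_alt_iff (n : Int) : checkVirus_alt n = true ↔ Reach n := by
  unfold checkVirus_alt
  by_cases h : n < 1 ∨ n > 10000
  · rw [if_pos h]
    simp only [Bool.false_eq_true, false_iff]
    intro hr
    have := reach_range hr
    omega
  · rw [if_neg h]
    push_neg at h
    obtain ⟨hn1, hn2⟩ := h
    have hof : PySem.Set.ofList [n] = [n] := by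
      simp [PySem.Set.ofList, PySem.Set.add, PySem.Set.contains]
    rw [hof]
    have hInv : InvB n [n] [n] := by
      refine ⟨List.nodup_singleton _, ?_, fun x hx => hx, ?_, List.mem_singleton_self _,
        fun h1 => h1, ?_⟩
      · intro x hx
        rw [List.mem_singleton] at hx
        subst hx
        exact ⟨by omega, hn2⟩
      · intro x hx
        rw [List.mem_singleton] at hx
        subst hx
        exact ReachVia.refl _
      · intro x hx hnx
        exact absurd hx hnx
    have hmu : measureB [n] [n] < 20000 := by
      unfold measureB
      simp only [List.length_singleton]
      omega
    exact backLoop_iff 20000 [n] [n] hInv hmu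

-- ===== VERDICT (by name: the statement is the Claim_ definition above) =====
theorem checkVirus_spec : Claim_equal_checkVirus := by
  intro n _
  unfold Spec_checkVirus
  have hA := checkVirus_iff n
  have hB := checkVirus_alt_iff n
  cases hA' : checkVirus n <;> cases hB' : checkVirus_alt n <;>
    simp_all
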